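-- pv_equiv track=rewrite | github.com/meta-pytorch/torchcomms | tools/linter/adapters/flake8_linter.py | get_issue_severity
-- ===== SOURCE A (Python) =====
-- from enum import Enum
--
-- class LintSeverity(str, Enum):
--     ERROR = "error"
--     WARNING = "warning"
--     ADVICE = "advice"
--     DISABLED = "disabled"
--
-- def get_issue_severity(code: str) -> LintSeverity:
--     # "B901": `return x` inside a generator
--     # "B902": Invalid first argument to a method
--     # "B903": __slots__ efficiency
--     # "B950": Line too long
--     # "C4": Flake8 Comprehensions
--     # "C9": Cyclomatic complexity
--     # "E2": PEP8 horizontal whitespace "errors"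
--     # "E3": PEP8 blank line "errors"
--     # "E5": PEP8 line length "errors"
--     # "F401": Name imported but unused
--     # "F403": Star imports used
--     # "F405": Name possibly from star imports
--     if any(
--         code.startswith(x)
--         for x in [
--             "B9",
--             "C4",
--             "C9",
--             "E2",
--             "E3",
--             "E5",
--             "F401",
--             "F403",
--             "F405",
--         ]
--     ):
--         return LintSeverity.ADVICE
--
--     # "F821": Undefined name
--     # "E999": syntax error
--     if any(code.startswith(x) for x in ["F821", "E999"]):
--         return LintSeverity.ERROR
--
--     # "F": PyFlakes Error
--     # "B": flake8-bugbear Error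
--     # "E": PEP8 "Error"
--     # "W": PEP8 Warning
--     return LintSeverity.WARNING
-- ===== SOURCE B (Python) =====
-- from enum import Enum
--
-- class LintSeverity(str, Enum):
--     ERROR = "error"
--     WARNING = "warning"
--     ADVICE = "advice"
--     DISABLED = "disabled"
--
-- def get_issue_severity(code: str) -> LintSeverity:
--     # Hand-compiled decision tree (a trie over the first four characters),
--     # decided by structural pattern matching instead of scanning prefix lists.
--     match list(code[:4]):
--         case ['B', '9', *_] | ['C', ('4' | '9'), *_] | ['E', ('2' | '3' | '5'), *_]:
--             return LintSeverity.ADVICE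
--         case ['F', '4', '0', ('1' | '3' | '5')]:
--             return LintSeverity.ADVICE
--         case ['E', '9', '9', '9'] | ['F', '8', '2', '1']:
--             return LintSeverity.ERROR
--         case _:
--             return LintSeverity.WARNING
-- ===== Notes on version B (the rewrite author's own statement) =====
-- stated objective: alternative
-- what changed: Replaces the two startswith-scans over prefix lists by a hand-compiled decision tree: one structural pattern match (a trie over the first four characters) that classifies the code in a single dispatch.
import Mathlib
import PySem

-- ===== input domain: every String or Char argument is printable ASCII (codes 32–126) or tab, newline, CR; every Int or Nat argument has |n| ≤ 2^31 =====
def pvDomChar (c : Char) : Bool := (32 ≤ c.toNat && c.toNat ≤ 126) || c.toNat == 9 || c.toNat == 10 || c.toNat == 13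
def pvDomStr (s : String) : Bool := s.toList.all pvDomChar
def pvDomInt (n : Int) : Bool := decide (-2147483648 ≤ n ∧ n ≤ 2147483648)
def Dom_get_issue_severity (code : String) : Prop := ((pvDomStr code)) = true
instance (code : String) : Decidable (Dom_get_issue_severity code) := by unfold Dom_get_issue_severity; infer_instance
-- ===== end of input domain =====

-- B replaces A's two startswith-scans over prefix lists by a hand-compiled decision tree:
-- a single structural pattern match on the first four characters (a trie), same results.


-- ===== PORT A =====
-- LintSeverity is a str-valued enum: its members are ported as their string values.
def get_issue_severity (code : String) : String :=
  if (["B9", "C4", "C9", "E2", "E3", "E5", "F401", "F403", "F405"].any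
        (fun x => PySem.Str.startswith code x)) then
    "advice"
  else if (["F821", "E999"].any (fun x => PySem.Str.startswith code x)) then
    "error"
  else
    "warning"

-- ===== PORT B =====
-- B's structural `match list(code[:4])` ported as a Lean match on the sliced char list.
def get_issue_severity_alt (code : String) : String :=
  match (PySem.Str.slice code none (some 4)).toList with
  | 'B' :: '9' :: _ => "advice"
  | 'C' :: '4' :: _ => "advice"
  | 'C' :: '9' :: _ => "advice"
  | 'E' :: '2' :: _ => "advice"
  | 'E' :: '3' :: _ => "advice"
  | 'E' :: '5' :: _ => "advice"
  | ['F', '4', '0', '1'] => "advice"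
  | ['F', '4', '0', '3'] => "advice"
  | ['F', '4', '0', '5'] => "advice"
  | ['E', '9', '9', '9'] => "error"
  | ['F', '8', '2', '1'] => "error"
  | _ => "warning"

-- ===== PRECONDITION & SPEC =====
def Spec_get_issue_severity (code : String) (out : String) : Prop := out = get_issue_severity_alt code
instance (code : String) (out : String) : Decidable (Spec_get_issue_severity code out) := by unfold Spec_get_issue_severity; infer_instance

-- ===== CLAIM (what is proved, stated in full; the proofs are below) =====
def Claim_equal_get_issue_severity : Prop := ∀ (code : String), Dom_get_issue_severity code → Spec_get_issue_severity code (get_issue_severity code)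

-- ===== LEMMAS AND PROOFS =====

-- startswith is a fixed-length prefix test: cs.startswith(p) ↔ the first |p| chars equal p.
lemma pv_sw_eq (cs p : List Char) :
    PySem.Chars.startswith cs p = (cs.take p.length == p) := by
  by_cases h : p <+: cs
  · have h1 : PySem.Chars.startswith cs p = true := (PySem.Chars.startswith_iff cs p).mpr h
    have h2 : p = cs.take p.length := List.prefix_iff_eq_take.mp h
    rw [h1, ← h2]; simp
  · have h1 : PySem.Chars.startswith cs p = false := by
      rcases Bool.eq_false_or_eq_true (PySem.Chars.startswith cs p) with h' | h'
      · exact absurd ((PySem.Chars.startswith_iff cs p).mp h') h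
      · exact h'
    rw [h1]; symm; rw [beq_eq_false_iff_ne]
    intro he; exact h (List.prefix_iff_eq_take.mpr he.symm)

lemma pv_take2_cons {t : List Char} {x y : Char} (h : t.take 2 = [x, y]) :
    t = x :: y :: t.drop 2 := by
  conv_lhs => rw [← List.take_append_drop 2 t, h]
  simp

set_option maxHeartbeats 1000000 in
lemma pv_main (code : String) : get_issue_severity code = get_issue_severity_alt code := by
  unfold get_issue_severity get_issue_severity_alt
  simp only [List.any_cons, List.any_nil, Bool.or_false, PySem.Str.startswith_eq, pv_sw_eq]
  simp only [pysem]
  rw [PySem.List.slice_to (xs := code.toList) (show (0:Int) ≤ 4 by norm_num)]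
  simp only [show Int.toNat 4 = 4 from rfl,
    show ("B9".toList).length = 2 from rfl, show ("C4".toList).length = 2 from rfl,
    show ("C9".toList).length = 2 from rfl, show ("E2".toList).length = 2 from rfl,
    show ("E3".toList).length = 2 from rfl, show ("E5".toList).length = 2 from rfl,
    show ("F401".toList).length = 4 from rfl, show ("F403".toList).length = 4 from rfl,
    show ("F405".toList).length = 4 from rfl, show ("F821".toList).length = 4 from rfl,
    show ("E999".toList).length = 4 from rfl]
  rw [show code.toList.take 2 = (code.toList.take 4).take 2 by rw [List.take_take]; norm_num]
  rw [show code.toList.take 4 = (code.toList.take 4).take 4 by rw [List.take_take]; norm_num]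
  have hlen : (code.toList.take 4).length ≤ 4 := by simp
  generalize code.toList.take 4 = t4 at hlen ⊢
  rw [List.take_of_length_le hlen]
  by_cases h1 : t4 = ['F', '4', '0', '1']; · subst h1; decide
  by_cases h2 : t4 = ['F', '4', '0', '3']; · subst h2; decide
  by_cases h3 : t4 = ['F', '4', '0', '5']; · subst h3; decide
  by_cases h4 : t4 = ['F', '8', '2', '1']; · subst h4; decide
  by_cases h5 : t4 = ['E', '9', '9', '9']; · subst h5; decide
  by_cases g1 : t4.take 2 = ['B', '9']
  · rw [pv_take2_cons g1]; rw [pv_take2_cons g1] at h1 h2 h3 h4 h5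
    simp_all
  by_cases g2 : t4.take 2 = ['C', '4']
  · rw [pv_take2_cons g2]; rw [pv_take2_cons g2] at h1 h2 h3 h4 h5
    simp_all
  by_cases g3 : t4.take 2 = ['C', '9']
  · rw [pv_take2_cons g3]; rw [pv_take2_cons g3] at h1 h2 h3 h4 h5
    simp_all
  by_cases g4 : t4.take 2 = ['E', '2']
  · rw [pv_take2_cons g4]; rw [pv_take2_cons g4] at h1 h2 h3 h4 h5
    simp_all
  by_cases g5 : t4.take 2 = ['E', '3']
  · rw [pv_take2_cons g5]; rw [pv_take2_cons g5] at h1 h2 h3 h4 h5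
    simp_all
  by_cases g6 : t4.take 2 = ['E', '5']
  · rw [pv_take2_cons g6]; rw [pv_take2_cons g6] at h1 h2 h3 h4 h5
    simp_all
  rw [if_neg, if_neg]
  · split
    all_goals first
      | rfl
      | simp_all
  · simp only [Bool.or_eq_true, beq_iff_eq]
    rintro (h | h)
    · exact h4 h
    · exact h5 h
  · simp only [Bool.or_eq_true, beq_iff_eq]
    rintro (h | h | h | h | h | h | h | h | h)
    · exact g1 h
    · exact g2 h
    · exact g3 h
    · exact g4 h
    · exact g5 h
    · exact g6 h
    · exact h1 h
    · exact h2 h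
    · exact h3 h

-- ===== VERDICT (by name: the statement is the Claim_ definition above) =====
theorem get_issue_severity_spec : Claim_equal_get_issue_severity := by
  intro code _
  exact pv_main code
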